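-- pv_equiv track=rewrite | github.com/andreeaiana/nemig | src/kg_construction/components/normalize_util.py | _remove_unbalanced_bracket_content
-- ===== SOURCE A (Python) =====
-- def _remove_unbalanced_bracket_content(text: str) -> str:
--     """ Removes unbalanced brackets (i.e. unclosed/unopened) and their corresponding content. """
--     open_brackets = tuple('([{')
--     close_brackets = tuple(')]}')
--     mapping = dict(zip(open_brackets, close_brackets))
--     bracket_queue = []
--     position_queue = []
--
--     for pos, char in enumerate(text):
--         if char in open_brackets:
--             bracket_queue.append(mapping[char])
--             position_queue.append(pos)
--         elif char in close_brackets: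
--             if not bracket_queue or char != bracket_queue.pop():
--                 text = text[text.index(char)+1:]
--                 return _remove_unbalanced_bracket_content(text)
--
--     if not bracket_queue:
--         return text
--     else:
--         return text[:position_queue.pop()]
-- ===== SOURCE B (Python) =====
-- def _remove_unbalanced_bracket_content(text: str) -> str:
--     """ Removes unbalanced brackets (i.e. unclosed/unopened) and their corresponding content. """
--     closer_of = {'(': ')', '[': ']', '{': '}'}
--     while True:
--         expected = []   # stack of expected closing brackets
--         last_open = 0   # position of the most recent opening bracket
--         restart_at = -1
--         for i, ch in enumerate(text):
--             c = closer_of.get(ch)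
--             if c is not None:
--                 expected.append(c)
--                 last_open = i
--             elif ch in ')]}':
--                 if expected and expected[-1] == ch:
--                     expected.pop()
--                 else:
--                     restart_at = text.find(ch)
--                     break
--         if restart_at >= 0:
--             text = text[restart_at + 1:]
--             continue
--         return text if not expected else text[:last_open]
-- ===== Notes on version B (the rewrite author's own statement) =====
-- stated objective: faster
-- what changed: A's tail recursion (one Python stack frame per restart) becomes a single restartable while-loop, and A's two parallel queues (expected closers + all open positions) collapse into one stack of expected closers plus a single last-open-position variable.
import Mathlib
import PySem

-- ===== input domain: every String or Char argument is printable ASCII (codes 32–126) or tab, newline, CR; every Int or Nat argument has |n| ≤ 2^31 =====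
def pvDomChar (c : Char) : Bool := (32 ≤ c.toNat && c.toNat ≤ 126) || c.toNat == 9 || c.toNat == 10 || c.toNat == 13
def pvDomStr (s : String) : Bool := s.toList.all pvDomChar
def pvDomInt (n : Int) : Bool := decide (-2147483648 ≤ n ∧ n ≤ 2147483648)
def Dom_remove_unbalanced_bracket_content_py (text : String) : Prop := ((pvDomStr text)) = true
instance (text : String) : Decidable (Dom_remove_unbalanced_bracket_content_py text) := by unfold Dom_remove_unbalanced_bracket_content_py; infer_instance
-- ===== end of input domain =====

-- B replaces A's tail recursion by a restartable single loop over the characters that keeps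
-- one stack of expected closers plus the last opening position (instead of A's two parallel
-- queues); same return value everywhere (neither version mutates its argument).

-- ===== PORT A =====
-- A's stacks push/pop at the Python-list end; both ports keep the stack TOP AT THE HEAD
-- (cons = append, head = pop), the standard faithful encoding.
def pyA_mapping (c : Char) : Char :=          -- mapping[char] for char in '([{'
  if c = '(' then ')' else if c = '[' then ']' else '}'

-- the for-loop of A: early `return` is encoded as `.inl char` (the offending close bracket);
-- normal fall-through returns the final (bracket_queue, position_queue)
def pyA_scan : List (Int × Char) → List Char → List Int → Sum Char (List Char × List Int)
  | [], bq, pq => .inr (bq, pq)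
  | (pos, char) :: rest, bq, pq =>
    if char = '(' ∨ char = '[' ∨ char = '{' then
      pyA_scan rest (pyA_mapping char :: bq) (pos :: pq)
    else if char = ')' ∨ char = ']' ∨ char = '}' then
      match bq with
      | [] => .inl char
      | b :: bq' => if char ≠ b then .inl char else pyA_scan rest bq' pq
    else pyA_scan rest bq pq

-- A's recursion, guarded by fuel (|text| + 1 always suffices: every restart drops ≥ 1 char;
-- the fuel-0 branch is unreachable from `remove_unbalanced_bracket_content_py`)
def pyA_go : Nat → String → String
  | 0, t => t
  | n + 1, t =>
    match pyA_scan (PySem.List.enumerate t.toList 0) [] [] with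
    | .inl char =>   -- text = text[text.index(char)+1:]; return _remove_unbalanced_bracket_content(text)
        pyA_go n (PySem.Str.slice t (some (PySem.Str.find t (String.ofList [char]) + 1)) none)
    | .inr (bq, pq) =>
        if bq = [] then t
        else PySem.Str.slice t none (some (pq.headD 0))   -- text[:position_queue.pop()]

def remove_unbalanced_bracket_content_py (text : String) : String :=
  pyA_go (text.toList.length + 1) text

-- ===== PORT B =====
def pyAlt_closer (ch : Char) : Option Char :=   -- closer_of.get(ch)
  if ch = '(' then some ')' else if ch = '[' then some ']'
  else if ch = '{' then some '}' else none

-- B's for-loop: `break` with restart_at already computed is `.inl restart_at`;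
-- fall-through yields (expected, last_open)
def pyAlt_scan (t : String) : List Char → Int → List Char → Int → Sum Int (List Char × Int)
  | [], _, expected, lastOpen => .inr (expected, lastOpen)
  | ch :: rest, i, expected, lastOpen =>
    match pyAlt_closer ch with
    | some c => pyAlt_scan t rest (i + 1) (c :: expected) i
    | none =>
      if ch = ')' ∨ ch = ']' ∨ ch = '}' then
        match expected with
        | top :: expected' =>
          if top = ch then pyAlt_scan t rest (i + 1) expected' lastOpen
          else .inl (PySem.Str.find t (String.ofList [ch]))   -- restart_at = text.find(ch)
        | [] => .inl (PySem.Str.find t (String.ofList [ch]))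
      else pyAlt_scan t rest (i + 1) expected lastOpen

-- B's `while True` loop, guarded by the same always-sufficient fuel
def pyAlt_go : Nat → String → String
  | 0, t => t
  | n + 1, t =>
    match pyAlt_scan t t.toList 0 [] 0 with
    | .inl restartAt => pyAlt_go n (PySem.Str.slice t (some (restartAt + 1)) none)  -- text = text[restart_at+1:]
    | .inr (expected, lastOpen) =>
        if expected = [] then t else PySem.Str.slice t none (some lastOpen)

def remove_unbalanced_bracket_content_py_alt (text : String) : String :=
  pyAlt_go (text.toList.length + 1) text

-- ===== PRECONDITION & SPEC =====
def Spec_remove_unbalanced_bracket_content_py (text : String) (out : String) : Prop :=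
  out = remove_unbalanced_bracket_content_py_alt text
instance (text : String) (out : String) : Decidable (Spec_remove_unbalanced_bracket_content_py text out) := by
  unfold Spec_remove_unbalanced_bracket_content_py; infer_instance

-- ===== CLAIM (what is proved, stated in full; the proofs are below) =====
def Claim_equal_remove_unbalanced_bracket_content_py : Prop :=
  ∀ (text : String), Dom_remove_unbalanced_bracket_content_py text →
    Spec_remove_unbalanced_bracket_content_py text (remove_unbalanced_bracket_content_py text)

-- ===== LEMMAS AND PROOFS =====

-- relation between the two scans' outcomes: same restart cut, or same stack with
-- B's last_open equal to the head of A's position queue whenever the stack is nonempty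
def pvScanRel (t : String) : Sum Char (List Char × List Int) → Sum Int (List Char × Int) → Prop
  | .inl c, .inl r => r = PySem.Str.find t (String.ofList [c])
  | .inr (bq, pq), .inr (exp, lo) => exp = bq ∧ (bq ≠ [] → pq.headD 0 = lo)
  | _, _ => False

lemma pvScan_agree (t : String) :
    ∀ (rest : List Char) (i : Int) (bq : List Char) (pq : List Int) (lo : Int),
      (pq ≠ [] → pq.headD 0 = lo) → (bq ≠ [] → pq ≠ []) →
      pvScanRel t (pyA_scan (PySem.List.enumerate rest i) bq pq) (pyAlt_scan t rest i bq lo) := by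
  intro rest
  induction rest with
  | nil =>
    intro i bq pq lo h1 h2
    simp only [PySem.List.enumerate_nil, pyA_scan, pyAlt_scan, pvScanRel]
    exact ⟨trivial, fun hb => h1 (h2 hb)⟩
  | cons ch rest ih =>
    intro i bq pq lo h1 h2
    rw [PySem.List.enumerate_cons]
    by_cases hop : ch = '(' ∨ ch = '[' ∨ ch = '{'
    · have hcl : pyAlt_closer ch = some (pyA_mapping ch) := by
        rcases hop with h | h | h <;> subst h <;> rfl
      simp only [pyA_scan, pyAlt_scan, if_pos hop, hcl]
      exact ih (i + 1) (pyA_mapping ch :: bq) (i :: pq) i (by simp) (by simp)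
    · have hcl : pyAlt_closer ch = none := by
        simp only [pyAlt_closer]
        rw [not_or, not_or] at hop
        simp [hop.1, hop.2.1, hop.2.2]
      by_cases hclose : ch = ')' ∨ ch = ']' ∨ ch = '}'
      · cases bq with
        | nil =>
          simp [pyA_scan, pyAlt_scan, if_neg hop, if_pos hclose, hcl, pvScanRel]
        | cons b bq' =>
          by_cases hne : ch = b
          · subst hne
            simp only [pyA_scan, pyAlt_scan, if_neg hop, if_pos hclose, hcl, ne_eq,
              not_true_eq_false]
            exact ih (i + 1) bq' pq lo h1 (fun hb => h2 (by simp))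
          · simp only [pyA_scan, pyAlt_scan, if_neg hop, if_pos hclose, hcl, ne_eq, hne,
              not_false_eq_true, if_pos]
            have : ¬ b = ch := fun h => hne h.symm
            simp [this, pvScanRel]
      · simp only [pyA_scan, pyAlt_scan, if_neg hop, if_neg hclose, hcl]
        exact ih (i + 1) bq pq lo h1 h2

lemma pvGo_agree : ∀ (n : Nat) (t : String), pyA_go n t = pyAlt_go n t := by
  intro n
  induction n with
  | zero => intro t; rfl
  | succ n ih =>
    intro t
    have h := pvScan_agree t t.toList 0 [] [] 0 (by simp) (by simp)
    simp only [pyA_go, pyAlt_go]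
    cases hA : pyA_scan (PySem.List.enumerate t.toList 0) [] [] with
    | inl c =>
      cases hB : pyAlt_scan t t.toList 0 [] 0 with
      | inl r =>
        rw [hA, hB] at h
        simp only [pvScanRel] at h
        rw [h]; exact ih _
      | inr p => rw [hA, hB] at h; simp [pvScanRel] at h
    | inr p =>
      obtain ⟨bq, pq⟩ := p
      cases hB : pyAlt_scan t t.toList 0 [] 0 with
      | inl r => rw [hA, hB] at h; simp [pvScanRel] at h
      | inr q =>
        obtain ⟨exp, lo⟩ := q
        rw [hA, hB] at h
        obtain ⟨hexp, hlo⟩ := h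
        rw [hexp]
        by_cases hbq : bq = []
        · simp [hbq]
        · dsimp only; rw [if_neg hbq, if_neg hbq, ← hlo hbq]

-- ===== VERDICT (by name: the statement is the Claim_ definition above) =====
theorem remove_unbalanced_bracket_content_py_spec : Claim_equal_remove_unbalanced_bracket_content_py := by
  intro text _
  unfold Spec_remove_unbalanced_bracket_content_py remove_unbalanced_bracket_content_py
    remove_unbalanced_bracket_content_py_alt
  exact pvGo_agree _ text
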